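-- pv_equiv track=rewrite | github.com/pujinxiao/Auto_media | app/services/story_llm.py | _preserve_character_identity_fields
-- ===== SOURCE A (Python) =====
-- def _preserve_character_identity_fields(existing_characters: list[dict], incoming_characters: list[dict]) -> list[dict]:
--     existing_by_id = {
--         str(character.get("id", "")).strip(): character
--         for character in existing_characters
--         if str(character.get("id", "")).strip()
--     }
--
--     sanitized: list[dict] = []
--     for character in incoming_characters:
--         char_id = str(character.get("id", "")).strip()
--         existing = existing_by_id.get(char_id)
--         if existing:
--             sanitized.append(
--                 {
--                     **character,
--                     "name": existing.get("name", character.get("name", "")),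
--                     "role": existing.get("role", character.get("role", "")),
--                 }
--             )
--             continue
--         sanitized.append(character)
--     return sanitized
-- ===== SOURCE B (Python) =====
-- def _preserve_character_identity_fields(existing_characters: list[dict], incoming_characters: list[dict]) -> list[dict]:
--     # No prebuilt index: each incoming id is resolved by scanning existing_characters
--     # from the back (last match wins, like the dict's last-wins overwrite).
--     def merged(character, existing):
--         return {
--             **character,
--             "name": existing.get("name", character.get("name", "")),
--             "role": existing.get("role", character.get("role", "")),
--         }
--
--     result = []
--     for character in incoming_characters:
--         char_id = str(character.get("id", "")).strip()
--         match = None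
--         if char_id:
--             for existing in reversed(existing_characters):
--                 if str(existing.get("id", "")).strip() == char_id:
--                     match = existing
--                     break
--         result.append(character if match is None else merged(character, match))
--     return result
-- ===== Notes on version B (the rewrite author's own statement) =====
-- stated objective: simpler
-- what changed: Removed the existing_by_id dict index entirely: each incoming character's stripped id is matched by a direct backwards scan of existing_characters (last match wins, mirroring the dict's last-wins overwrite), merging name/role on a hit.
import Mathlib
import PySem

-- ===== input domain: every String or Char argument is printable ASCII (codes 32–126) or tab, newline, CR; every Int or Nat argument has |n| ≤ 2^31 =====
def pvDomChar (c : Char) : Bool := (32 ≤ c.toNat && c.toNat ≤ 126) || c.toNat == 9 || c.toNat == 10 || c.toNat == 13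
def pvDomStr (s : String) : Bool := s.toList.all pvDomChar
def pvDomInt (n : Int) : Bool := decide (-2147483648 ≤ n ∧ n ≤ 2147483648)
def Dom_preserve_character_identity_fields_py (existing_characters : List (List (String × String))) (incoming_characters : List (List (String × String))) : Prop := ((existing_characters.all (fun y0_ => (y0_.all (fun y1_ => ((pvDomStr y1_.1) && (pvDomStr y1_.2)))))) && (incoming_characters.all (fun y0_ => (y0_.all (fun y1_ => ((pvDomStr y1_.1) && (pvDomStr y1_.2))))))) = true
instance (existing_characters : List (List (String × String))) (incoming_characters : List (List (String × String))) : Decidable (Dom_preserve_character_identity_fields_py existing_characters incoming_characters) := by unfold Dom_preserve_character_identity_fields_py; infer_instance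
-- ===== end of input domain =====

-- B replaces A's prebuilt existing_by_id index by a per-character backwards scan of
-- existing_characters (last match wins) — simpler, same return value, no speed claim.


-- ===== PORT A =====
-- shared vocabulary: each Python dict is a List (String × String); lookup/update via PySem.Dict

-- character.get(k, dflt)  (first match; Python dicts have unique keys)
def pvCharGetD (c : List (String × String)) (k dflt : String) : String :=
  (PySem.Dict.mk c).getD k dflt

-- str(character.get("id", "")).strip()   (values are strings, so str() is the identity)
def pvCharId (c : List (String × String)) : String :=
  PySem.Str.strip (pvCharGetD c "id" "")

-- {**character, "name": existing.get("name", character.get("name","")), "role": existing.get("role", character.get("role",""))}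
def pvMerge (character existing : List (String × String)) : List (String × String) :=
  (((PySem.Dict.mk character).insert "name"
      (pvCharGetD existing "name" (pvCharGetD character "name" ""))).insert "role"
      (pvCharGetD existing "role" (pvCharGetD character "role" ""))).items

-- port of A: build existing_by_id (last-wins on duplicate non-empty stripped ids), then one pass over incoming
def preserve_character_identity_fields_py (existing_characters : List (List (String × String))) (incoming_characters : List (List (String × String))) : List (List (String × String)) :=
  let existing_by_id : PySem.Dict String (List (String × String)) :=
    existing_characters.foldl
      (fun d character => if pvCharId character ≠ "" then d.insert (pvCharId character) character else d)
      PySem.Dict.empty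
  incoming_characters.foldl
    (fun sanitized character =>
      match existing_by_id.get? (pvCharId character) with
      | some existing =>
          -- Python's `if existing:` — a dict is truthy iff non-empty
          if existing.isEmpty then sanitized ++ [character]
          else sanitized ++ [pvMerge character existing]
      | none => sanitized ++ [character])
    []

-- ===== PORT B =====
-- port of B: no index; per incoming character a backwards scan of existing_characters (last match wins)
def preserve_character_identity_fields_py_alt (existing_characters : List (List (String × String))) (incoming_characters : List (List (String × String))) : List (List (String × String)) :=
  incoming_characters.map (fun character =>
    let char_id := pvCharId character
    if char_id = "" then character
    else
      match existing_characters.reverse.find? (fun existing => pvCharId existing == char_id) with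
      | some m => pvMerge character m
      | none => character)
-- ===== PRECONDITION & SPEC =====
def Spec_preserve_character_identity_fields_py (existing_characters : List (List (String × String))) (incoming_characters : List (List (String × String))) (out : List (List (String × String))) : Prop := out = preserve_character_identity_fields_py_alt existing_characters incoming_characters
instance (existing_characters : List (List (String × String))) (incoming_characters : List (List (String × String))) (out : List (List (String × String))) : Decidable (Spec_preserve_character_identity_fields_py existing_characters incoming_characters out) := by unfold Spec_preserve_character_identity_fields_py; infer_instance

-- ===== CLAIM (what is proved, stated in full; the proofs are below) =====
def Claim_equal_preserve_character_identity_fields_py : Prop := ∀ (existing_characters : List (List (String × String))) (incoming_characters : List (List (String × String))), Dom_preserve_character_identity_fields_py existing_characters incoming_characters → Spec_preserve_character_identity_fields_py existing_characters incoming_characters (preserve_character_identity_fields_py existing_characters incoming_characters)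

-- ===== LEMMAS AND PROOFS =====

-- the loop step building existing_by_id in port A
def pvStep (d : PySem.Dict String (List (String × String))) (character : List (String × String)) : PySem.Dict String (List (String × String)) :=
  if pvCharId character ≠ "" then d.insert (pvCharId character) character else d

lemma pvCharId_nil : pvCharId [] = "" := by decide

-- a non-empty stripped id is never a key of the built index
lemma get?_fold_empty (l : List (List (String × String))) (d : PySem.Dict String (List (String × String))) :
    (l.foldl pvStep d).get? "" = d.get? "" := by
  induction l generalizing d with
  | nil => rfl
  | cons e t ih =>
    simp only [List.foldl_cons, ih]
    unfold pvStep
    split_ifs with h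
    · rw [PySem.Dict.get?_insert_of_ne d e (by simpa using (Ne.symm h))]
    · rfl

-- last-wins lookup in the built index = first match scanning the reversed list
lemma get?_fold (cid : String) (hc : cid ≠ "") (l : List (List (String × String))) (d : PySem.Dict String (List (String × String))) :
    (l.foldl pvStep d).get? cid =
      (l.reverse.find? (fun existing => pvCharId existing == cid)).or (d.get? cid) := by
  induction l generalizing d with
  | nil => simp
  | cons e t ih =>
    simp only [List.foldl_cons, ih, List.reverse_cons, List.find?_append]
    have hstep : (pvStep d e).get? cid =
        if pvCharId e == cid then some e else d.get? cid := by
      unfold pvStep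
      by_cases he : pvCharId e = cid
      · subst he
        simp [hc, PySem.Dict.get?_insert_self]
      · simp only [beq_iff_eq, he, if_false]
        split_ifs with h
        · rw [PySem.Dict.get?_insert_of_ne d e (Ne.symm he)]
        · rfl
    rw [hstep]
    by_cases hp : pvCharId e == cid
    · cases hfind : t.reverse.find? (fun existing => pvCharId existing == cid) <;>
        simp [hp, List.find?]
    · cases hfind : t.reverse.find? (fun existing => pvCharId existing == cid) <;>
        simp [hp, List.find?]

-- ===== VERDICT (by name: the statement is the Claim_ definition above) =====
theorem preserve_character_identity_fields_py_spec : Claim_equal_preserve_character_identity_fields_py := by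
  intro ex inc hdom
  clear hdom
  unfold Spec_preserve_character_identity_fields_py
  unfold preserve_character_identity_fields_py preserve_character_identity_fields_py_alt
  rw [show (fun d character => if pvCharId character ≠ "" then d.insert (pvCharId character) character else d) = pvStep from rfl]
  induction inc using List.reverseRecOn with
  | nil => rfl
  | append_singleton t c ih =>
    rw [List.foldl_append, List.map_append, ← ih, List.foldl_cons, List.foldl_nil, List.map_cons, List.map_nil]
    by_cases hc : pvCharId c = ""
    · rw [hc, get?_fold_empty]
      simp [PySem.Dict.get?_empty]
    · rw [get?_fold (pvCharId c) hc, PySem.Dict.get?_empty, Option.or_none]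
      simp only [hc, if_false]
      cases hfind : ex.reverse.find? (fun existing => pvCharId existing == pvCharId c) with
      | none => rfl
      | some m =>
        have hm : pvCharId m = pvCharId c := by
          have := List.find?_some hfind
          simpa using this
        have hne : m ≠ [] := by
          intro h; subst h; exact hc (hm ▸ pvCharId_nil)
        simp [List.isEmpty_iff, hne]
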